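-- pv_equiv track=rewrite | github.com/RyanWhitell/music | helpers/general.py | lily_conv
-- ===== SOURCE A (Python) =====
-- def lily_conv(note):
--     """
--         Converts bmtithlop notes to lilypond notation.
--     """
--     new_note = ''
--
--     for i, char in enumerate(note):
--         if i == 0:
--             new_note += char.lower()
--         else:
--             new_note += char.replace('b', 'f').replace('#', 's').lower()
--     return new_note
-- ===== SOURCE B (Python) =====
-- def lily_conv(note):
--     if not note:
--         return ''
--     return note[0].lower() + note[1:].replace('b', 'f').replace('#', 's').lower()
-- ===== Notes on version B (the rewrite author's own statement) =====
-- stated objective: simpler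
-- what changed: Replaces the per-character enumerate loop with an index-0 branch by an empty-string guard plus bulk string operations: first char lowered, the rest transformed once with replace/replace/lower on the whole slice.
import Mathlib
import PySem

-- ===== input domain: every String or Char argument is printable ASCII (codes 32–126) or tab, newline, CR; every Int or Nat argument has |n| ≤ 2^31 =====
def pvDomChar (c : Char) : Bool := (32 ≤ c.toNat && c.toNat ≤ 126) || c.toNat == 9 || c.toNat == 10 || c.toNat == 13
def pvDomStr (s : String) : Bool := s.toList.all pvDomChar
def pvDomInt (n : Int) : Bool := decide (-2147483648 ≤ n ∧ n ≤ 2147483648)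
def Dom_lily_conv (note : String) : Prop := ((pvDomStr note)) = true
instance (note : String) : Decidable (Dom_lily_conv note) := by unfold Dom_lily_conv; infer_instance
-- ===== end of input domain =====

-- B replaces A's per-character enumerate loop by an empty-string guard, a lowered first
-- character, and bulk replace/replace/lower on the remainder (objective: simpler).


-- ===== PORT A =====
-- the loop body: i == 0 → char.lower(); else char.replace('b','f').replace('#','s').lower()
-- (char is a single character, so each str.replace is exact pointwise)
def lily_conv (note : String) : String :=
  String.mk ((PySem.List.enumerate note.toList 0).foldl
    (fun acc (p : Int × Char) =>
      if p.1 == 0 then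
        acc ++ [PySem.Chars.lowerChar p.2]
      else  -- char.replace('b','f').replace('#','s').lower()
        acc ++ [PySem.Chars.lowerChar
          (if (if p.2 == 'b' then 'f' else p.2) == '#' then 's'
           else if p.2 == 'b' then 'f' else p.2)]) [])

-- ===== PORT B =====
-- if not note: return ''  else note[0].lower() + note[1:].replace('b','f').replace('#','s').lower()
def lily_conv_alt (note : String) : String :=
  match note.toList with
  | [] => ""
  | c :: rest =>
      String.mk (PySem.Chars.lowerChar c ::
        PySem.Chars.lower (PySem.Chars.replace (PySem.Chars.replace rest ['b'] ['f']) ['#'] ['s']))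

-- ===== PRECONDITION & SPEC =====
def Spec_lily_conv (note : String) (out : String) : Prop := out = lily_conv_alt note
instance (note : String) (out : String) : Decidable (Spec_lily_conv note out) := by unfold Spec_lily_conv; infer_instance

-- ===== CLAIM (what is proved, stated in full; the proofs are below) =====
def Claim_equal_lily_conv : Prop := ∀ (note : String), Dom_lily_conv note → Spec_lily_conv note (lily_conv note)

-- ===== LEMMAS AND PROOFS =====

-- replace with a single-character pattern is a pointwise substitution
theorem replace_go_singleton (b f : Char) :
    ∀ (l acc : List Char) (fuel : Nat), l.length ≤ fuel →
      PySem.Chars.replace.go [b] [f] fuel l acc =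
        acc.reverse ++ l.map (fun c => if c == b then f else c) := by
  intro l
  induction l with
  | nil => intro acc fuel _; cases fuel <;> simp [PySem.Chars.replace.go]
  | cons c t ih =>
      intro acc fuel hle
      cases fuel with
      | zero => simp at hle
      | succ fuel =>
        rw [PySem.Chars.replace.go]
        have ht : t.length ≤ fuel := by simpa using Nat.le_of_succ_le_succ hle
        by_cases hcb : c = b
        · subst hcb; simp [List.isPrefixOf, ih (f :: acc) fuel ht]
        · simp [List.isPrefixOf, hcb, Ne.symm hcb, ih (c :: acc) fuel ht]

theorem replace_singleton (b f : Char) (l : List Char) :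
    PySem.Chars.replace l [b] [f] = l.map (fun c => if c == b then f else c) := by
  simpa [PySem.Chars.replace] using replace_go_singleton b f l [] l.length le_rfl

-- A's tail loop (indices ≥ 1) appends the pointwise transform of the rest
theorem tail_loop (rest : List Char) :
    ∀ (i : Int) (acc : List Char), 1 ≤ i →
      (PySem.List.enumerate rest i).foldl
        (fun acc (p : Int × Char) =>
          if p.1 == 0 then acc ++ [PySem.Chars.lowerChar p.2]
          else
            acc ++ [PySem.Chars.lowerChar
              (if (if p.2 == 'b' then 'f' else p.2) == '#' then 's'
               else if p.2 == 'b' then 'f' else p.2)]) acc =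
      acc ++ rest.map (fun c =>
        PySem.Chars.lowerChar
          (if (if c == 'b' then 'f' else c) == '#' then 's' else if c == 'b' then 'f' else c)) := by
  induction rest with
  | nil => intro i acc _; simp [PySem.List.enumerate_nil]
  | cons c t ih =>
      intro i acc hi
      have hi0 : (i == 0) = false := by simp; omega
      rw [PySem.List.enumerate_cons, List.foldl_cons]
      simp only [hi0, Bool.false_eq_true, if_false]
      rw [ih (i + 1) _ (by omega)]
      simp

theorem lily_conv_eq_alt (note : String) : lily_conv note = lily_conv_alt note := by
  unfold lily_conv lily_conv_alt
  cases h : note.toList with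
  | nil => rfl
  | cons c rest =>
      rw [PySem.List.enumerate_cons, List.foldl_cons]
      simp only [beq_self_eq_true, if_true, List.nil_append]
      rw [tail_loop rest (0 + 1) _ (by norm_num)]
      simp [PySem.Chars.lower, replace_singleton, Function.comp_def]

-- ===== VERDICT (by name: the statement is the Claim_ definition above) =====
theorem lily_conv_spec : Claim_equal_lily_conv := by
  intro note _
  unfold Spec_lily_conv
  exact lily_conv_eq_alt note
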